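-- pv_equiv track=rewrite | github.com/posl/comment_recommendation | script/mod_gen/3_time/en/264_D/9.py | count_swaps
-- ===== SOURCE A (Python) =====
-- def count_swaps(s):
--     if len(s) < 2:
--         return 0
--     if len(s) == 2:
--         if s[0] == 'a':
--             if s[1] == 't':
--                 return 0
--             else:
--                 return 1
--         else:
--             return 2
--     if s[0] == 'a':
--         return count_swaps(s[1:])
--     else:
--         return 1 + count_swaps(s[1:])
-- ===== SOURCE B (Python) =====
-- def count_swaps(s):
--     n = len(s)
--     if n < 2:
--         return 0
--     cnt = sum(1 for c in s[:n - 2] if c != 'a')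
--     if s[n - 2] == 'a':
--         return cnt + (0 if s[n - 1] == 't' else 1)
--     return cnt + 2
-- ===== Notes on version B (the rewrite author's own statement) =====
-- stated objective: faster
-- what changed: Replaces the O(n^2) recursion (each step slicing s[1:]) with a single linear pass counting non-'a' characters in the prefix plus a direct check of the last two characters.
import Mathlib
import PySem

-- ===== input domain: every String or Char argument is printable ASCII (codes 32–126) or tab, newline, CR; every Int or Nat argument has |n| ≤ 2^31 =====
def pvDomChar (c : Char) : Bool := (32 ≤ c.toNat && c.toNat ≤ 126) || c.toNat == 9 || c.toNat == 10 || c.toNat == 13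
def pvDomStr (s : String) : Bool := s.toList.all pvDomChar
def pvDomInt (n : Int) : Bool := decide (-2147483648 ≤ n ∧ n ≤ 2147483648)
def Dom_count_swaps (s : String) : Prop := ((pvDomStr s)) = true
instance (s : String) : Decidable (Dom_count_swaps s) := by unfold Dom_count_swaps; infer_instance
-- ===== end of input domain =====

-- B replaces A's O(n^2) slicing recursion by one linear count over the prefix plus a check of the last two characters.

-- ===== PORT A =====
-- A's recursion on s[1:], transliterated over the character list.
def countSwapsRec : List Char → Int
  | [] => 0
  | [_] => 0
  | [c0, c1] => if c0 = 'a' then (if c1 = 't' then 0 else 1) else 2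
  | c0 :: c1 :: c2 :: rest =>
      if c0 = 'a' then countSwapsRec (c1 :: c2 :: rest)
      else 1 + countSwapsRec (c1 :: c2 :: rest)

def count_swaps (s : String) : Int := countSwapsRec s.toList

-- ===== PORT B =====
-- B: count non-'a' chars in s[:n-2] (one pass), then resolve the last two chars directly.
-- the indices n-2 and n-1 are in range since n ≥ 2, so List.getD's default is never used
def count_swaps_alt (s : String) : Int :=
  let l := s.toList
  let n := l.length
  if n < 2 then 0
  else
    let cnt : Int := ((l.take (n - 2)).countP (fun c => c ≠ 'a') : Nat)
    if l.getD (n - 2) ' ' = 'a' then cnt + (if l.getD (n - 1) ' ' = 't' then 0 else 1)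
    else cnt + 2

-- ===== PRECONDITION & SPEC =====
def Spec_count_swaps (s : String) (out : Int) : Prop := out = count_swaps_alt s
instance (s : String) (out : Int) : Decidable (Spec_count_swaps s out) := by unfold Spec_count_swaps; infer_instance

-- ===== CLAIM (what is proved, stated in full; the proofs are below) =====
def Claim_equal_count_swaps : Prop := ∀ (s : String), Dom_count_swaps s → Spec_count_swaps s (count_swaps s)

-- ===== LEMMAS AND PROOFS =====

def altList (l : List Char) : Int :=
  let n := l.length
  if n < 2 then 0
  else
    let cnt : Int := ((l.take (n - 2)).countP (fun c => c ≠ 'a') : Nat)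
    if l.getD (n - 2) ' ' = 'a' then cnt + (if l.getD (n - 1) ' ' = 't' then 0 else 1)
    else cnt + 2

theorem countSwapsRec_cons (c0 : Char) (t : List Char) (h : 2 ≤ t.length) :
    countSwapsRec (c0 :: t) = (if c0 = 'a' then 0 else 1) + countSwapsRec t := by
  match t, h with
  | c1 :: c2 :: rest, _ =>
    by_cases hc0 : c0 = 'a' <;> simp [countSwapsRec, hc0]

theorem altList_cons (c0 : Char) (t : List Char) (h : 2 ≤ t.length) :
    altList (c0 :: t) = (if c0 = 'a' then 0 else 1) + altList t := by
  have h1 : ¬ ((c0 :: t).length < 2) := by simp only [List.length_cons]; omega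
  have h2 : ¬ (t.length < 2) := by omega
  simp only [altList, if_neg h1, if_neg h2]
  have hl : (c0 :: t).length - 2 = (t.length - 2) + 1 := by simp only [List.length_cons]; omega
  have hl1 : (c0 :: t).length - 1 = (t.length - 1) + 1 := by simp only [List.length_cons]; omega
  rw [hl, hl1, List.take_succ_cons, List.getD_cons_succ, List.getD_cons_succ]
  by_cases hc0 : c0 = 'a' <;> simp [hc0] <;>
    split_ifs <;> ring

theorem countSwapsRec_eq_altList : ∀ l : List Char, countSwapsRec l = altList l := by
  intro l
  induction l with
  | nil => simp [countSwapsRec, altList]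
  | cons c0 t ih =>
    match t with
    | [] => simp [countSwapsRec, altList]
    | [c1] =>
      by_cases hc0 : c0 = 'a' <;> by_cases hc1 : c1 = 't' <;>
        simp [countSwapsRec, altList, hc0, hc1]
    | c1 :: c2 :: rest =>
      have h : 2 ≤ (c1 :: c2 :: rest).length := by simp
      rw [countSwapsRec_cons c0 _ h, altList_cons c0 _ h, ih]

-- ===== VERDICT (by name: the statement is the Claim_ definition above) =====
theorem count_swaps_spec : Claim_equal_count_swaps := by
  intro s _
  show count_swaps s = count_swaps_alt s
  have : count_swaps_alt s = altList s.toList := rfl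
  rw [this, count_swaps, countSwapsRec_eq_altList]
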